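-- pv_equiv track=rewrite | github.com/ivndrkk/csc1004-labs | lab5.2/unique_052.py | uniqueNum
-- ===== SOURCE A (Python) =====
-- def uniqueNum(num_str):
--     seen = {}
--     nums_list = num_str.split()
--     for i in range(len(nums_list)):
--         if nums_list[i] not in seen:
--             seen[nums_list[i]] = 1
--         else:
--             seen[nums_list[i]] += 1
--
--     result = "none"
--     for key, value in seen.items():
--         if value == 1 and int(key) > (int(result) if result != "none" else -1):
--             result = key
--     return result
-- ===== SOURCE B (Python) =====
-- def uniqueNum(num_str):
--     counts = {}
--     for t in num_str.split():
--         counts[t] = counts.get(t, 0) + 1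
--     uniques = [t for t in counts if counts[t] == 1]
--     if not uniques:
--         return "none"
--     return sorted(uniques, key=int, reverse=True)[0]
-- ===== Notes on version B (the rewrite author's own statement) =====
-- stated objective: alternative
-- what changed: B replaces A's sentinel-based running-max scan over the dict items with a filter of the count-1 tokens followed by a stable descending sort by integer value, returning the sorted list's first element; it also fixes A's -1 sentinel so all-negative unique numbers are found.
-- intended difference: On inputs where some token occurs exactly once but every such unique token has integer value <= -1 (e.g. "-1"), A returns "none" because its running maximum starts at the sentinel -1, while B returns the largest unique number (its first-seen representative), which is the intended result. — e.g. on uniqueNum("-1"): A returns "none", B returns "-1"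
import Mathlib
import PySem

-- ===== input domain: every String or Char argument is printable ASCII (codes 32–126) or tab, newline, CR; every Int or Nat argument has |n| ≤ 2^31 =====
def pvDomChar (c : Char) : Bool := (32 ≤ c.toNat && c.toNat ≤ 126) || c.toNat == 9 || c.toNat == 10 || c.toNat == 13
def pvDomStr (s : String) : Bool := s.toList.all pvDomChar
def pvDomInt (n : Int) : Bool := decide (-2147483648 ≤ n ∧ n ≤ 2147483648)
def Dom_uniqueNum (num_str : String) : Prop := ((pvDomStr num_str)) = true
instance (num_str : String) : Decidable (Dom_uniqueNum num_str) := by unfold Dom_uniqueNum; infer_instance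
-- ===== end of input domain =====

-- B replaces A's sentinel-based running-max scan with filter-the-unique-tokens + stable descending
-- sort by integer value + take the first element (alternative decomposition, not claimed faster);
-- B intentionally fixes A's "-1" sentinel on inputs whose unique tokens are all <= -1 (see D_).


-- ===== PORT A =====
-- 'int(key)' / 'int(result)' raise ValueError on non-numeric strings; Pre_ below excludes exactly
-- the inputs where A evaluates int() on a non-numeric token, so '.getD 0' is never the value used.
def uniqueNum (num_str : String) : String :=
  let nums_list := PySem.Str.split₀ num_str
  let seen := (PySem.List.pyRange 0 (PySem.List.len nums_list)).foldl
    (fun (d : PySem.Dict String Int) i =>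
      let t := PySem.List.pyGetD nums_list i ""   -- nums_list[i]: i always in range here
      if d.contains t = false then d.insert t 1
      else d.insert t (d.getD t 0 + 1)) PySem.Dict.empty
  seen.items.foldl
    (fun result kv =>
      if kv.2 = 1 ∧ (PySem.Int.ofStr? kv.1).getD 0 >
          (if result ≠ "none" then (PySem.Int.ofStr? result).getD 0 else -1)
      then kv.1 else result) "none"

-- ===== PORT B =====
-- 'int' as sort key raises ValueError on non-numeric unique tokens; Pre_ excludes those inputs.
def uniqueNum_alt (num_str : String) : String :=
  let counts := (PySem.Str.split₀ num_str).foldl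
      (fun (d : PySem.Dict String Int) t => d.insert t (d.getD t 0 + 1)) PySem.Dict.empty
  let uniques := (counts.items.filter (fun kv => kv.2 == 1)).map Prod.fst
  if uniques = [] then "none"
  else (PySem.List.sorted uniques (fun s => (PySem.Int.ofStr? s).getD 0) true).headD "none"

-- ===== PRECONDITION & SPEC =====
-- Pre_ excludes exactly the inputs on which both programs raise ValueError: a token occurring
-- exactly once that int() does not parse (A calls int(key) on every count-1 key, B uses key=int).
def Pre_uniqueNum (num_str : String) : Prop :=
  ∀ t ∈ PySem.Str.split₀ num_str,
    (PySem.Str.split₀ num_str).count t = 1 → (PySem.Int.ofStr? t).isSome = true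
instance (num_str : String) : Decidable (Pre_uniqueNum num_str) := by
  unfold Pre_uniqueNum; infer_instance
def pvWitness_uniqueNum : String := "3 1 3"

-- On inputs where some token occurs exactly once but every such unique token has integer value
-- ≤ -1 (e.g. "-1"), A returns "none" because its running maximum starts at the sentinel -1,
-- while B returns the largest unique number, which is the intended result.
def D_uniqueNum (num_str : String) : Prop :=
  (∃ t ∈ PySem.Str.split₀ num_str, (PySem.Str.split₀ num_str).count t = 1) ∧
  ∀ t ∈ PySem.Str.split₀ num_str,
    (PySem.Str.split₀ num_str).count t = 1 → (PySem.Int.ofStr? t).getD 0 ≤ -1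
instance (num_str : String) : Decidable (D_uniqueNum num_str) := by
  unfold D_uniqueNum; infer_instance

def Spec_uniqueNum (num_str : String) (out : String) : Prop :=
  ¬ D_uniqueNum num_str → out = uniqueNum_alt num_str
instance (num_str : String) (out : String) : Decidable (Spec_uniqueNum num_str out) := by
  unfold Spec_uniqueNum; infer_instance

def pvDiffWitness_uniqueNum : String := "-1"
def pvDiffWitnessOut_uniqueNum : String × String := ("none", "-1")

-- ===== CLAIM (what is proved, stated in full; the proofs are below) =====
def Claim_unchanged_uniqueNum : Prop := ∀ (num_str : String), Dom_uniqueNum num_str → Pre_uniqueNum num_str → Spec_uniqueNum num_str (uniqueNum num_str)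
def Claim_changed_uniqueNum : Prop := Dom_uniqueNum (pvDiffWitness_uniqueNum) ∧ Pre_uniqueNum (pvDiffWitness_uniqueNum) ∧ D_uniqueNum (pvDiffWitness_uniqueNum) ∧ uniqueNum (pvDiffWitness_uniqueNum) = pvDiffWitnessOut_uniqueNum.1 ∧ uniqueNum_alt (pvDiffWitness_uniqueNum) = pvDiffWitnessOut_uniqueNum.2 ∧ pvDiffWitnessOut_uniqueNum.1 ≠ pvDiffWitnessOut_uniqueNum.2
def Claim_exact_uniqueNum : Prop := ∀ (num_str : String), Dom_uniqueNum num_str → Pre_uniqueNum num_str → D_uniqueNum num_str → uniqueNum num_str ≠ uniqueNum_alt num_str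

-- ===== LEMMAS AND PROOFS =====

-- the integer value both programs compare on (total stand-in; Pre_ makes the tokens parse)
def pvKey (s : String) : Int := (PySem.Int.ofStr? s).getD 0

-- the list of count-1 tokens in first-occurrence order
def pvU (num_str : String) : List String :=
  (PySem.Set.ofList (PySem.Str.split₀ num_str)).filter
    (fun k => ((PySem.Str.split₀ num_str).count k : Int) == 1)

-- A's answer given the reverse-sorted candidate list: head if its key beats the -1 sentinel
def pvGate : List String → String
  | [] => "none"
  | h :: _ => if pvKey h > -1 then h else "none"

lemma pvGate_cons (h : String) (t : List String) :
    pvGate (h :: t) = if pvKey h > -1 then h else "none" := rfl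

lemma pvStep_gate (x : String) (acc : List String)
    (hacc : ∀ y ∈ acc, y ≠ "none") :
    (if pvKey x > (if pvGate acc ≠ "none" then pvKey (pvGate acc) else -1) then x
     else pvGate acc)
    = pvGate (PySem.List.insertBy (fun a b => decide (pvKey b < pvKey a)) x acc) := by
  cases acc with
  | nil => simp [pvGate, PySem.List.insertBy]
  | cons y ys =>
    have hy : y ≠ "none" := hacc y (by simp)
    by_cases h2 : pvKey y < pvKey x
    · have hins : PySem.List.insertBy (fun a b => decide (pvKey b < pvKey a)) x (y :: ys)
          = x :: y :: ys := by simp [PySem.List.insertBy, h2]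
      rw [hins]
      by_cases h1 : pvKey y > -1
      · have hg : pvGate (y :: ys) = y := by rw [pvGate_cons, if_pos h1]
        rw [hg, if_pos hy, pvGate_cons, if_pos (by omega), if_pos (by omega)]
      · have hg : pvGate (y :: ys) = "none" := by rw [pvGate_cons, if_neg h1]
        have hn : (if ("none" : String) ≠ "none" then pvKey "none" else -1) = -1 := by simp
        rw [hg, hn, pvGate_cons]
    · have hins : PySem.List.insertBy (fun a b => decide (pvKey b < pvKey a)) x (y :: ys)
          = y :: PySem.List.insertBy (fun a b => decide (pvKey b < pvKey a)) x ys := by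
        simp [PySem.List.insertBy, h2]
      rw [hins]
      by_cases h1 : pvKey y > -1
      · have hg : pvGate (y :: ys) = y := by rw [pvGate_cons, if_pos h1]
        rw [hg, if_pos hy, if_neg (by omega), pvGate_cons, if_pos h1]
      · have hg : pvGate (y :: ys) = "none" := by rw [pvGate_cons, if_neg h1]
        have hn : (if ("none" : String) ≠ "none" then pvKey "none" else -1) = -1 := by simp
        rw [hg, hn, if_neg (by omega), pvGate_cons, if_neg h1]

lemma pvFold_gate (U : List String) :
    ∀ (acc : List String) (r : String),
    (∀ x ∈ U, x ≠ "none") → (∀ x ∈ acc, x ≠ "none") → r = pvGate acc →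
    U.foldl (fun r x => if pvKey x > (if r ≠ "none" then pvKey r else -1) then x else r) r
      = pvGate (U.foldl
          (fun acc x => PySem.List.insertBy (fun a b => decide (pvKey b < pvKey a)) x acc) acc) := by
  induction U with
  | nil => intro acc r _ _ hr; simpa using hr
  | cons x U ih =>
    intro acc r hU hacc hr
    have hx : x ≠ "none" := hU x (by simp)
    simp only [List.foldl_cons]
    apply ih
    · intro y hy; exact hU y (by simp [hy])
    · intro y hy
      rcases (PySem.List.mem_insertBy _ x y acc).1 hy with h | h
      · exact h ▸ hx
      · exact hacc y h
    · rw [hr]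
      exact pvStep_gate x acc hacc

-- A computes the gate of the reverse-sorted unique-token list
lemma uniqueNum_eq_gate (s : String) (hn : ∀ x ∈ pvU s, x ≠ "none") :
    uniqueNum s = pvGate (PySem.List.sorted (pvU s) pvKey true) := by
  simp only [uniqueNum]
  have hrange : List.foldl
      (fun (d : PySem.Dict String Int) i =>
        if d.contains (PySem.List.pyGetD (PySem.Str.split₀ s) i "") = false then
          d.insert (PySem.List.pyGetD (PySem.Str.split₀ s) i "") 1
        else
          d.insert (PySem.List.pyGetD (PySem.Str.split₀ s) i "")
            (d.getD (PySem.List.pyGetD (PySem.Str.split₀ s) i "") 0 + 1))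
      PySem.Dict.empty (PySem.List.pyRange 0 (PySem.List.len (PySem.Str.split₀ s)))
      = List.foldl
        (fun (d : PySem.Dict String Int) t =>
          if d.contains t = false then d.insert t 1 else d.insert t (d.getD t 0 + 1))
        PySem.Dict.empty (PySem.Str.split₀ s) := by
    have h := PySem.List.foldl_pyRange_pyGetD (PySem.Str.split₀ s) ""
      (fun (d : PySem.Dict String Int) t =>
        if d.contains t = false then d.insert t 1 else d.insert t (d.getD t 0 + 1))
      PySem.Dict.empty (a := 0) (le_refl 0)
    simpa using h
  rw [hrange]
  have hstep : (fun (d : PySem.Dict String Int) t =>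
      if d.contains t = false then d.insert t 1 else d.insert t (d.getD t 0 + 1))
      = fun (d : PySem.Dict String Int) t => d.insert t (d.getD t 0 + 1) := by
    funext d t
    by_cases h : d.contains t = false
    · rw [if_pos h, PySem.Dict.getD_of_not_contains d 0 h]; norm_num
    · rw [if_neg h]
  rw [hstep, PySem.Dict.foldl_insert_getD_add_one_eq_counter, PySem.Dict.items_counter,
      List.foldl_map]
  have hsplit : (fun (r : String) (k : String) =>
      if ((List.count k (PySem.Str.split₀ s) : Int) = 1) ∧ (PySem.Int.ofStr? k).getD 0 >
          (if r ≠ "none" then (PySem.Int.ofStr? r).getD 0 else -1) then k else r)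
      = fun r k =>
        if ((List.count k (PySem.Str.split₀ s) : Int) == 1) = true then
          (if pvKey k > (if r ≠ "none" then pvKey r else -1) then k else r) else r := by
    funext r k
    by_cases h : (List.count k (PySem.Str.split₀ s) : Int) = 1
    · simp [h, pvKey]
    · simp [h]
  rw [hsplit, ← List.foldl_filter]
  rw [PySem.List.sorted_rev_eq_foldl_insertBy]
  exact pvFold_gate (pvU s) [] "none" hn (by simp) rfl

-- B computes head-or-"none" of the same reverse-sorted list
lemma uniqueNum_alt_eq (s : String) :
    uniqueNum_alt s =
      if pvU s = [] then "none"
      else (PySem.List.sorted (pvU s) pvKey true).headD "none" := by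
  simp only [uniqueNum_alt]
  rw [PySem.Dict.foldl_insert_getD_add_one_eq_counter, PySem.Dict.items_counter,
      List.filter_map, List.map_map]
  have h1 : ((fun kv : String × Int => kv.2 == 1) ∘
      fun k => (k, (List.count k (PySem.Str.split₀ s) : Int)))
      = fun k => ((List.count k (PySem.Str.split₀ s) : Int) == 1) := rfl
  have h2 : (Prod.fst ∘ fun k : String => (k, (List.count k (PySem.Str.split₀ s) : Int)))
      = id := rfl
  rw [h1, h2, List.map_id]
  rfl

-- every element of pvU s occurs in the tokens with count 1
lemma mem_pvU {s : String} {x : String} (hx : x ∈ pvU s) :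
    x ∈ PySem.Str.split₀ s ∧ (PySem.Str.split₀ s).count x = 1 := by
  unfold pvU at hx
  rcases List.mem_filter.1 hx with ⟨hmem, hcnt⟩
  refine ⟨?_, ?_⟩
  · simpa [← PySem.List.dedup_eq_ofList, PySem.List.mem_dedup] using hmem
  · have : (List.count x (PySem.Str.split₀ s) : Int) = 1 := by simpa using hcnt
    exact_mod_cast this

lemma pvU_parse {s : String} (hpre : Pre_uniqueNum s) :
    ∀ x ∈ pvU s, (PySem.Int.ofStr? x).isSome = true := by
  intro x hx
  rcases mem_pvU hx with ⟨h1, h2⟩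
  exact hpre x h1 h2

lemma pvU_ne_none {s : String} (hpre : Pre_uniqueNum s) : ∀ x ∈ pvU s, x ≠ "none" := by
  intro x hx heq
  have := pvU_parse hpre x hx
  rw [heq] at this
  simp [show PySem.Int.ofStr? "none" = none from by decide] at this

-- ===== VERDICT (by name: the statement is the Claim_ definition above) =====
theorem uniqueNum_spec : Claim_unchanged_uniqueNum := by
  intro s _ hpre hnd
  rw [uniqueNum_eq_gate s (pvU_ne_none hpre), uniqueNum_alt_eq]
  by_cases hU : pvU s = []
  · rw [if_pos hU]
    simp [hU, pvGate, PySem.List.sorted]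
  · rw [if_neg hU]
    -- ¬ D_ and pvU s ≠ [] give a unique token with key > -1
    obtain ⟨t0, ht0⟩ := List.exists_mem_of_ne_nil _ hU
    have hex : ∃ t ∈ PySem.Str.split₀ s, (PySem.Str.split₀ s).count t = 1 :=
      ⟨t0, (mem_pvU ht0).1, (mem_pvU ht0).2⟩
    unfold D_uniqueNum at hnd
    push Not at hnd
    obtain ⟨t, htm, htc, htk⟩ := hnd hex
    have htU : t ∈ pvU s := by
      unfold pvU
      refine List.mem_filter.2 ⟨?_, by simp [htc]⟩
      simpa [← PySem.List.dedup_eq_ofList, PySem.List.mem_dedup] using htm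
    have hkt : pvKey t > -1 := by unfold pvKey; omega
    obtain ⟨h, tl, hs⟩ : ∃ h tl, PySem.List.sorted (pvU s) pvKey true = h :: tl := by
      cases hsr : PySem.List.sorted (pvU s) pvKey true with
      | nil => exact absurd ((PySem.List.sorted_eq_nil_iff _ _ _).1 hsr) hU
      | cons h tl => exact ⟨h, tl, rfl⟩
    have hge := PySem.List.key_head_sorted_rev_ge (pvU s) pvKey hs t htU
    rw [hs]
    simp only [pvGate, List.headD_cons]
    rw [if_pos (by omega)]

theorem uniqueNum_changed : Claim_changed_uniqueNum := by
  unfold Claim_changed_uniqueNum; decide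

theorem uniqueNum_tight : Claim_exact_uniqueNum := by
  intro s _ hpre hd
  rw [uniqueNum_eq_gate s (pvU_ne_none hpre), uniqueNum_alt_eq]
  obtain ⟨⟨t, htm, htc⟩, hall⟩ := hd
  have htU : t ∈ pvU s := by
    unfold pvU
    refine List.mem_filter.2 ⟨?_, by simp [htc]⟩
    simpa [← PySem.List.dedup_eq_ofList, PySem.List.mem_dedup] using htm
  have hU : pvU s ≠ [] := fun h => by simp [h] at htU
  rw [if_neg hU]
  obtain ⟨h, tl, hs⟩ : ∃ h tl, PySem.List.sorted (pvU s) pvKey true = h :: tl := by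
    cases hsr : PySem.List.sorted (pvU s) pvKey true with
    | nil => exact absurd ((PySem.List.sorted_eq_nil_iff _ _ _).1 hsr) hU
    | cons h tl => exact ⟨h, tl, rfl⟩
  have hhU : h ∈ pvU s := by
    have : h ∈ PySem.List.sorted (pvU s) pvKey true := by simp [hs]
    exact (PySem.List.mem_sorted _ _ _ _).1 this
  have hkey : pvKey h ≤ -1 := by
    rcases mem_pvU hhU with ⟨h1, h2⟩
    exact hall h h1 h2
  rw [hs]
  simp only [pvGate, List.headD_cons]
  rw [if_neg (by omega)]
  exact fun heq => pvU_ne_none hpre h hhU heq.symm
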